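-- pv_equiv track=rewrite | github.com/mkXultra/mew | src/mew/implement_lane/exec_runtime.py | _read_shell_word
-- ===== SOURCE A (Python) =====
-- def _read_shell_word(text: str, start: int) -> tuple[str, int]:
--     chars: list[str] = []
--     in_single = False
--     in_double = False
--     escaped = False
--     index = max(0, int(start))
--     while index < len(text):
--         char = text[index]
--         if escaped:
--             chars.append(char)
--             escaped = False
--             index += 1
--             continue
--         if char == "\\" and not in_single:
--             escaped = True
--             index += 1
--             continue
--         if char == "'" and not in_double:
--             in_single = not in_single
--             index += 1
--             continue
--         if char == '"' and not in_single:
--             in_double = not in_double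
--             index += 1
--             continue
--         if not in_single and not in_double and (char.isspace() or char in {";", "&", "|", "(", ")"}):
--             break
--         chars.append(char)
--         index += 1
--     return "".join(chars), index
-- ===== SOURCE B (Python) =====
-- def _read_shell_word(text: str, start: int) -> tuple[str, int]:
--     # Nested-scanner decomposition: quoted sections are consumed by inner loops.
--     chars: list[str] = []
--     n = len(text)
--     i = max(0, int(start))
--     while i < n:
--         c = text[i]
--         if c == "\\":
--             i += 1
--             if i < n:
--                 chars.append(text[i])
--                 i += 1
--             continue
--         if c == "'":
--             i += 1
--             while i < n and text[i] != "'":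
--                 chars.append(text[i])
--                 i += 1
--             if i < n:
--                 i += 1  # closing quote
--             continue
--         if c == '"':
--             i += 1
--             while i < n:
--                 d = text[i]
--                 if d == '"':
--                     i += 1
--                     break
--                 if d == "\\":
--                     i += 1
--                     if i < n:
--                         chars.append(text[i])
--                         i += 1
--                     continue
--                 chars.append(d)
--                 i += 1
--             continue
--         if c.isspace() or c in ";&|()":
--             break
--         chars.append(c)
--         i += 1
--     return "".join(chars), i
-- ===== Notes on version B (the rewrite author's own statement) =====
-- stated objective: alternative
-- what changed: A's single flag-driven state machine (in_single/in_double/escaped booleans carried through one loop) is replaced by a nested-scanner decomposition: the outer loop has no state, and dedicated inner loops consume an entire single- or double-quoted section (and the backslash escape consumes its next character directly).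
import Mathlib
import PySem

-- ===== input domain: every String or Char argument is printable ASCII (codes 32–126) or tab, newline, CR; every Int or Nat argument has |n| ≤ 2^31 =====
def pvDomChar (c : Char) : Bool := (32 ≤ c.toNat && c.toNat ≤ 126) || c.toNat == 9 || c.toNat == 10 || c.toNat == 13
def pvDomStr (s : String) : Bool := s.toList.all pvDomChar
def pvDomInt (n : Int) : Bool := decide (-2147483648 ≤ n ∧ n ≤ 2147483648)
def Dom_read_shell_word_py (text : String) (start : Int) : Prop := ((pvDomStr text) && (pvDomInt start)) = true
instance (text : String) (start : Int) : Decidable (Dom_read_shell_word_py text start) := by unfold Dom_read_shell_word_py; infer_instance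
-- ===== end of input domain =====

-- B replaces A's single flag-driven state machine (in_single/in_double/escaped flags) by a
-- nested-scanner decomposition: dedicated inner loops consume quoted sections (alternative; same cost).

-- ===== PORT A =====
-- delimiter test: char.isspace() or char in {";", "&", "|", "(", ")"}  (both Pythons test this verbatim)
def pvIsDelim (c : Char) : Bool :=
  PySem.Chars.isspace c || c == ';' || c == '&' || c == '|' || c == '(' || c == ')'

-- A's while-loop: scans the remaining characters with the three flags; returns (chars, consumed count)
def pvALoop (cs : List Char) (inS inD esc : Bool) : List Char × Nat :=
  match cs with
  | [] => ([], 0)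
  | c :: rest =>
    if esc then
      let p := pvALoop rest inS inD false
      (c :: p.1, p.2 + 1)
    else if c == '\\' && !inS then
      let p := pvALoop rest inS inD true
      (p.1, p.2 + 1)
    else if c == '\'' && !inD then
      let p := pvALoop rest (!inS) inD false
      (p.1, p.2 + 1)
    else if c == '"' && !inS then
      let p := pvALoop rest inS (!inD) false
      (p.1, p.2 + 1)
    else if !inS && !inD && pvIsDelim c then ([], 0)
    else
      let p := pvALoop rest inS inD false
      (c :: p.1, p.2 + 1)

def read_shell_word_py (text : String) (start : Int) : String × Int :=
  let i0 : Int := max 0 start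
  let p := pvALoop (text.toList.drop i0.toNat) false false false
  (String.ofList p.1, i0 + p.2)

-- ===== PORT B =====
-- inner loop for a single-quoted section: copies chars until the closing quote (or end of text);
-- returns (contents, consumed count including the closing quote, remaining characters)
def pvBSingle : List Char → List Char × Nat × List Char
  | [] => ([], 0, [])
  | c :: rest =>
    if c == '\'' then ([], 1, rest)
    else
      let p := pvBSingle rest
      (c :: p.1, p.2.1 + 1, p.2.2)

-- inner loop for a double-quoted section: like pvBSingle but backslash escapes the next char
def pvBDouble : List Char → List Char × Nat × List Char
  | [] => ([], 0, [])
  | c :: rest =>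
    if c == '"' then ([], 1, rest)
    else if c == '\\' then
      match rest with
      | [] => ([], 1, [])
      | d :: rest' =>
        let p := pvBDouble rest'
        (d :: p.1, p.2.1 + 2, p.2.2)
    else
      let p := pvBDouble rest
      (c :: p.1, p.2.1 + 1, p.2.2)

-- unfolding equations for pvBDouble (its nested match hides the default equations) and the
-- length bounds pvBLoop's termination proof cites
theorem pvBDouble_close (rest : List Char) :
    pvBDouble ('"' :: rest) = ([], 1, rest) := by
  rw [pvBDouble.eq_def]; simp

theorem pvBDouble_esc_nil :
    pvBDouble ['\\'] = ([], 1, []) := by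
  rw [pvBDouble.eq_def]; simp

theorem pvBDouble_esc (d : Char) (rest : List Char) :
    pvBDouble ('\\' :: d :: rest) =
      (d :: (pvBDouble rest).1, (pvBDouble rest).2.1 + 2, (pvBDouble rest).2.2) := by
  rw [pvBDouble.eq_def]; simp

theorem pvBDouble_other (c : Char) (rest : List Char) (h1 : ¬ c = '"') (h2 : ¬ c = '\\') :
    pvBDouble (c :: rest) =
      (c :: (pvBDouble rest).1, (pvBDouble rest).2.1 + 1, (pvBDouble rest).2.2) := by
  rw [pvBDouble.eq_def]; simp [h1, h2]

theorem pvBSingle_rest_le (l : List Char) : (pvBSingle l).2.2.length ≤ l.length := by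
  induction l with
  | nil => simp [pvBSingle]
  | cons c rest ih =>
    by_cases h : c == '\''
    all_goals simp [pvBSingle, h] <;> omega

theorem pvBDouble_rest_le (l : List Char) : (pvBDouble l).2.2.length ≤ l.length := by
  induction l using pvBDouble.induct with
  | case1 => simp [pvBDouble]
  | case2 c rest h =>
    have h' : c = '"' := by simpa using h
    subst h'; simp [pvBDouble_close]
  | case3 c h1 h2 =>
    have h2' : c = '\\' := by simpa using h2
    subst h2'; simp [pvBDouble_esc_nil]
  | case4 c h1 h2 d rest ih =>
    have h2' : c = '\\' := by simpa using h2
    subst h2'; simp [pvBDouble_esc]; omega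
  | case5 c rest h1 h2 ih =>
    simp [pvBDouble_other c rest (by simpa using h1) (by simpa using h2)]; omega

-- B's outer while-loop
def pvBLoop (cs : List Char) : List Char × Nat :=
  match cs with
  | c :: rest =>
    if c == '\\' then
      match rest with
      | [] => ([], 1)
      | d :: rest' =>
        let p := pvBLoop rest'
        (d :: p.1, p.2 + 2)
    else if c == '\'' then
      let s := pvBSingle rest
      let p := pvBLoop s.2.2
      (s.1 ++ p.1, 1 + s.2.1 + p.2)
    else if c == '"' then
      let s := pvBDouble rest
      let p := pvBLoop s.2.2
      (s.1 ++ p.1, 1 + s.2.1 + p.2)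
    else if pvIsDelim c then ([], 0)
    else
      let p := pvBLoop rest
      (c :: p.1, p.2 + 1)
  | [] => ([], 0)
termination_by cs.length
decreasing_by
  all_goals simp
  all_goals first
    | omega
    | exact pvBSingle_rest_le rest
    | exact pvBDouble_rest_le rest

def read_shell_word_py_alt (text : String) (start : Int) : String × Int :=
  let i0 : Int := max 0 start
  let p := pvBLoop (text.toList.drop i0.toNat)
  (String.ofList p.1, i0 + p.2)

-- ===== PRECONDITION & SPEC =====
def Spec_read_shell_word_py (text : String) (start : Int) (out : String × Int) : Prop := out = read_shell_word_py_alt text start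
instance (text : String) (start : Int) (out : String × Int) : Decidable (Spec_read_shell_word_py text start out) := by unfold Spec_read_shell_word_py; infer_instance

-- ===== CLAIM (what is proved, stated in full; the proofs are below) =====
def Claim_equal_read_shell_word_py : Prop := ∀ (text : String) (start : Int), Dom_read_shell_word_py text start → Spec_read_shell_word_py text start (read_shell_word_py text start)

-- ===== LEMMAS AND PROOFS =====

-- unfolding equations for pvBLoop, one per branch
theorem pvBLoop_nil : pvBLoop [] = ([], 0) := by rw [pvBLoop.eq_def]

theorem pvBLoop_esc_nil : pvBLoop ['\\'] = ([], 1) := by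
  rw [pvBLoop.eq_def]; simp

theorem pvBLoop_esc (d : Char) (rest : List Char) :
    pvBLoop ('\\' :: d :: rest) = (d :: (pvBLoop rest).1, (pvBLoop rest).2 + 2) := by
  rw [pvBLoop.eq_def]; simp

theorem pvBLoop_squote (rest : List Char) :
    pvBLoop ('\'' :: rest) =
      ((pvBSingle rest).1 ++ (pvBLoop (pvBSingle rest).2.2).1,
       1 + (pvBSingle rest).2.1 + (pvBLoop (pvBSingle rest).2.2).2) := by
  rw [pvBLoop.eq_def]; simp

theorem pvBLoop_dquote (rest : List Char) :
    pvBLoop ('"' :: rest) =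
      ((pvBDouble rest).1 ++ (pvBLoop (pvBDouble rest).2.2).1,
       1 + (pvBDouble rest).2.1 + (pvBLoop (pvBDouble rest).2.2).2) := by
  rw [pvBLoop.eq_def]; simp

theorem pvBLoop_delim (c : Char) (rest : List Char)
    (h1 : ¬ c = '\\') (h2 : ¬ c = '\'') (h3 : ¬ c = '"') (h4 : pvIsDelim c = true) :
    pvBLoop (c :: rest) = ([], 0) := by
  rw [pvBLoop.eq_def]; simp [h1, h2, h3, h4]

theorem pvBLoop_other (c : Char) (rest : List Char)
    (h1 : ¬ c = '\\') (h2 : ¬ c = '\'') (h3 : ¬ c = '"') (h4 : ¬ pvIsDelim c = true) :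
    pvBLoop (c :: rest) = (c :: (pvBLoop rest).1, (pvBLoop rest).2 + 1) := by
  rw [pvBLoop.eq_def]; simp [h1, h2, h3, h4]

-- A in single-quote mode behaves as pvBSingle followed by A in normal mode
theorem pvALoop_single (l : List Char) :
    pvALoop l true false false =
      ((pvBSingle l).1 ++ (pvALoop (pvBSingle l).2.2 false false false).1,
       (pvBSingle l).2.1 + (pvALoop (pvBSingle l).2.2 false false false).2) := by
  induction l with
  | nil => simp [pvALoop, pvBSingle]
  | cons c rest ih =>
    by_cases h : c == '\''
    · simp [pvALoop, pvBSingle, h, Nat.add_comm]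
    · simp [pvALoop, pvBSingle, h, ih] <;> omega

-- A in double-quote mode behaves as pvBDouble followed by A in normal mode
theorem pvALoop_double (l : List Char) :
    pvALoop l false true false =
      ((pvBDouble l).1 ++ (pvALoop (pvBDouble l).2.2 false false false).1,
       (pvBDouble l).2.1 + (pvALoop (pvBDouble l).2.2 false false false).2) := by
  induction l using pvBDouble.induct with
  | case1 => simp [pvALoop, pvBDouble]
  | case2 c rest h =>
    have h' : c = '"' := by simpa using h
    subst h'; simp [pvALoop, pvBDouble_close] <;> omega
  | case3 c h1 h2 =>
    have h2' : c = '\\' := by simpa using h2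
    subst h2'; simp [pvALoop, pvBDouble_esc_nil]
  | case4 c h1 h2 d rest ih =>
    have h2' : c = '\\' := by simpa using h2
    subst h2'; simp [pvALoop, pvBDouble_esc, ih] <;> omega
  | case5 c rest h1 h2 ih =>
    have h1' : ¬ c = '"' := by simpa using h1
    have h2' : ¬ c = '\\' := by simpa using h2
    simp [pvALoop, pvBDouble_other c rest h1' h2', h1', h2', ih] <;> omega

-- the two outer loops agree
theorem pvALoop_eq_pvBLoop (l : List Char) : pvALoop l false false false = pvBLoop l := by
  induction l using pvBLoop.induct with
  | case1 c h =>
    have h' : c = '\\' := by simpa using h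
    subst h'; simp [pvALoop, pvBLoop_esc_nil]
  | case2 c h d rest ih =>
    have h' : c = '\\' := by simpa using h
    subst h'; simp [pvALoop, pvBLoop_esc, ih]
  | case3 c rest h1 h2 s ih =>
    have h1' : ¬ c = '\\' := by simpa using h1
    have h2' : c = '\'' := by simpa using h2
    subst h2'
    have ih' : pvALoop (pvBSingle rest).2.2 false false false = pvBLoop (pvBSingle rest).2.2 := ih
    simp [pvALoop, pvBLoop_squote, pvALoop_single, ih'] <;> omega
  | case4 c rest h1 h2 h3 s ih =>
    have h1' : ¬ c = '\\' := by simpa using h1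
    have h2' : ¬ c = '\'' := by simpa using h2
    have h3' : c = '"' := by simpa using h3
    subst h3'
    have ih' : pvALoop (pvBDouble rest).2.2 false false false = pvBLoop (pvBDouble rest).2.2 := ih
    simp [pvALoop, pvBLoop_dquote, pvALoop_double, ih'] <;> omega
  | case5 c rest h1 h2 h3 h4 =>
    have h1' : ¬ c = '\\' := by simpa using h1
    have h2' : ¬ c = '\'' := by simpa using h2
    have h3' : ¬ c = '"' := by simpa using h3
    simp [pvALoop, pvBLoop_delim c rest h1' h2' h3' h4, h1', h2', h3', h4]
  | case6 c rest h1 h2 h3 h4 ih =>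
    have h1' : ¬ c = '\\' := by simpa using h1
    have h2' : ¬ c = '\'' := by simpa using h2
    have h3' : ¬ c = '"' := by simpa using h3
    simp [pvALoop, pvBLoop_other c rest h1' h2' h3' h4, h1', h2', h3', h4, ih]
  | case7 => simp [pvALoop, pvBLoop_nil]

-- ===== VERDICT (by name: the statement is the Claim_ definition above) =====
theorem read_shell_word_py_spec : Claim_equal_read_shell_word_py := by
  intro text start _
  unfold Spec_read_shell_word_py read_shell_word_py read_shell_word_py_alt
  simp [pvALoop_eq_pvBLoop]
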